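-- pv_equiv track=rewrite | github.com/peter-grajcar/phonetisk | transcribe.py | devoice_final
-- ===== SOURCE A (Python) =====
-- UNVOICED_PHONES = ["p", "t", "c", "k", "x", "G", "ts", "tS", "s", "S", "f", "c:", "s:" "S:" "ts:", "tS:"]
--
-- VOICED_PHONES =   ["b", "d", "J\\", "g", "h", "h\\", "dz", "dZ", "z", "Z", "v", "J\\:", "z:" "Z\\:", "dz:", "dZ:"]
--
-- def add_voicing(phone: str) -> str:
--     try:
--         return VOICED_PHONES[UNVOICED_PHONES.index(phone)]
--     except ValueError:
--         return phone
--
-- def remove_voicing(phone: str) -> str: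
--     try:
--         return UNVOICED_PHONES[VOICED_PHONES.index(phone)]
--     except ValueError:
--         return phone
--
-- def change_voicing(phone: str) -> str:
--     if phone in UNVOICED_PHONES:
--         return add_voicing(phone)
--     elif phone in VOICED_PHONES:
--         return remove_voicing(phone)
--     else:
--         return phone
--
-- def devoice_final(phones: list[str]) -> list[str]:
--     if phones[-1] in VOICED_PHONES:
--         phone_set = VOICED_PHONES
--     elif phones[-1] in UNVOICED_PHONES:
--         phone_set = UNVOICED_PHONES
--     else:
--         return phones
--     i = len(phones) - 1
--     while i >= 0 and phones[i] in phone_set: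
--         phones[i] = change_voicing(phones[i])
--         i -= 1
--
--     return phones
-- ===== SOURCE B (Python) =====
-- UNVOICED_PHONES = ["p", "t", "c", "k", "x", "G", "ts", "tS", "s", "S", "f", "c:", "s:" "S:" "ts:", "tS:"]
--
-- VOICED_PHONES =   ["b", "d", "J\\", "g", "h", "h\\", "dz", "dZ", "z", "Z", "v", "J\\:", "z:" "Z\\:", "dz:", "dZ:"]
--
--
-- def devoice_final(phones: list[str]) -> list[str]:
--     last = phones[-1]
--     if last in VOICED_PHONES:
--         table = dict(zip(VOICED_PHONES, UNVOICED_PHONES))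
--     elif last in UNVOICED_PHONES:
--         table = dict(zip(UNVOICED_PHONES, VOICED_PHONES))
--     else:
--         return phones
--     # single forward pass: collect the current candidate run in `pending`,
--     # flushing it (untouched) into `done` whenever a non-candidate appears;
--     # what is left pending at the end is the trailing run, swapped via the table
--     done = []
--     pending = []
--     for p in phones:
--         if p in table:
--             pending.append(p)
--         else:
--             done += pending
--             done.append(p)
--             pending = []
--     phones[:] = done + [table[p] for p in pending]
--     return phones
-- ===== Notes on version B (the rewrite author's own statement) =====
-- stated objective: alternative
-- what changed: A scans backward from the end with an index-based while loop, mutating each run element via change_voicing's repeated list.index scans; B makes one forward pass with two accumulators (finished prefix / pending candidate run), flushing the pending run whenever a non-candidate appears, and finally swaps the surviving trailing run through a zip-built pairing table.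
import Mathlib
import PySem

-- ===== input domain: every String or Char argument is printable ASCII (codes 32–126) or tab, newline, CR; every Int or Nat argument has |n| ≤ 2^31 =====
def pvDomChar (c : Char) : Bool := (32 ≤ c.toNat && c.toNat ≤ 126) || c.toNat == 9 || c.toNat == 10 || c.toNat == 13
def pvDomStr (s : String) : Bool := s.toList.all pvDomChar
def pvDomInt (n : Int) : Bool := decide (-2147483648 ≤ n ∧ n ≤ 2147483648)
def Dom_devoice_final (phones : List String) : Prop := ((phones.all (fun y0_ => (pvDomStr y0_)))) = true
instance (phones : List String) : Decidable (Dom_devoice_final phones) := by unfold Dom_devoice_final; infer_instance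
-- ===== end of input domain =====

-- B replaces A's backward index-based scan-and-mutate (with list.index scans inside change_voicing)
-- by one forward pass with two accumulators (finished prefix / pending candidate run) and a zip-built
-- pairing table ("alternative"). Both A and B mutate the argument list in place in Python; the
-- equivalence proved here is about the return value.

-- ===== PORT A =====
-- the module constants, with Python's implicit adjacent-string-literal concatenation kept as written
def pyU : List String := ["p", "t", "c", "k", "x", "G", "ts", "tS", "s", "S", "f", "c:", "s:S:ts:", "tS:"]
def pyV : List String := ["b", "d", "J\\", "g", "h", "h\\", "dz", "dZ", "z", "Z", "v", "J\\:", "z:Z\\:", "dz:", "dZ:"]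

-- add_voicing: VOICED[UNVOICED.index(phone)], ValueError caught; the lookup VOICED[i] is always in range
def add_voicing? (phone : String) : Option String :=
  match PySem.List.index? pyU phone with
  | some i => PySem.List.pyGet? pyV (i : Int)
  | none => some phone

-- remove_voicing: UNVOICED[VOICED.index(phone)]; none = the uncaught IndexError (pyU is shorter than pyV)
def remove_voicing? (phone : String) : Option String :=
  match PySem.List.index? pyV phone with
  | some i => PySem.List.pyGet? pyU (i : Int)
  | none => some phone

def change_voicing? (phone : String) : Option String :=
  if pyU.contains phone then add_voicing? phone
  else if pyV.contains phone then remove_voicing? phone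
  else some phone

-- the while loop, fuel n = i + 1; the none branches are the raising paths, excluded by Pre_
def devoiceLoopA (S : List String) : List String → Nat → List String
  | ps, 0 => ps
  | ps, i + 1 =>
    match PySem.List.pyGet? ps (i : Int) with
    | none => ps
    | some p =>
      if S.contains p then
        match change_voicing? p with
        | some q => devoiceLoopA S (PySem.List.pySetD ps (i : Int) q) i
        | none => ps
      else ps

def devoice_final (phones : List String) : List String :=
  match PySem.List.pyGet? phones (-1) with
  | none => phones  -- IndexError on the empty list, excluded by Pre_
  | some last =>
    if pyV.contains last then devoiceLoopA pyV phones phones.length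
    else if pyU.contains last then devoiceLoopA pyU phones phones.length
    else phones

-- ===== PORT B =====
-- table = dict(zip(VOICED_PHONES, UNVOICED_PHONES)) resp. dict(zip(UNVOICED_PHONES, VOICED_PHONES))
def tableVU : PySem.Dict String String := PySem.Dict.ofList (pyV.zip pyU)
def tableUV : PySem.Dict String String := PySem.Dict.ofList (pyU.zip pyV)

-- the loop body: if p in table: pending.append(p) else: done += pending; done.append(p); pending = []
def stepB (t : PySem.Dict String String) (st : List String × List String) (p : String) :
    List String × List String :=
  if t.contains p then (st.1, st.2 ++ [p]) else (st.1 ++ st.2 ++ [p], [])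

-- [table[p] for p in pending]; none = the KeyError raising path, excluded by Pre_
def lookupAll (t : PySem.Dict String String) : List String → Option (List String)
  | [] => some []
  | p :: rest =>
    match t.get? p, lookupAll t rest with
    | some v, some vs => some (v :: vs)
    | _, _ => none

-- the forward pass + final swap of the pending trailing run
def applyB (phones : List String) (t : PySem.Dict String String) : List String :=
  let st := phones.foldl (stepB t) ([], [])
  match lookupAll t st.2 with
  | some toggled => st.1 ++ toggled
  | none => phones  -- KeyError, excluded by Pre_

def devoice_final_alt (phones : List String) : List String :=
  match PySem.List.pyGet? phones (-1) with
  | none => phones  -- IndexError on the empty list, as in A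
  | some last =>
    if pyV.contains last then applyB phones tableVU
    else if pyU.contains last then applyB phones tableUV
    else phones

-- ===== PRECONDITION & SPEC =====
-- Pre_ excludes exactly the inputs on which A raises: the empty list (IndexError on phones[-1]) and lists whose
-- maximal trailing run of voiced phones contains "dZ:", where remove_voicing raises IndexError (the missing-comma
-- typo makes UNVOICED_PHONES one entry shorter than VOICED_PHONES).
def Pre_devoice_final (phones : List String) : Prop :=
  phones ≠ [] ∧ "dZ:" ∉ phones.reverse.takeWhile (fun p => pyV.contains p)
instance (phones : List String) : Decidable (Pre_devoice_final phones) := by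
  unfold Pre_devoice_final; infer_instance

def pvWitness_devoice_final : List String := ["a", "t", "d"]

def Spec_devoice_final (phones : List String) (out : List String) : Prop := out = devoice_final_alt phones
instance (phones : List String) (out : List String) : Decidable (Spec_devoice_final phones out) := by
  unfold Spec_devoice_final; infer_instance

-- ===== CLAIM (what is proved, stated in full; the proofs are below) =====
def Claim_equal_devoice_final : Prop := ∀ (phones : List String), Dom_devoice_final phones → Pre_devoice_final phones → Spec_devoice_final phones (devoice_final phones)

-- ===== LEMMAS AND PROOFS =====

-- proof-side abbreviation for the value every run element is swapped to (never used by the ports)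
def toggle : PySem.Dict String String := PySem.Dict.ofList (pyU.zip pyV ++ pyV.zip pyU)
def cvB (p : String) : String := toggle.getD p p

-- change_voicing agrees with cvB on every phone except the raising "dZ:"
lemma cv_eq_mem : ∀ p ∈ pyU ++ pyV, p = "dZ:" ∨ change_voicing? p = some (cvB p) := by decide

lemma toggle_keys : toggle.keys = pyU ++ pyV.take 14 := by decide

lemma cv_eq (p : String) (h : p ≠ "dZ:") : change_voicing? p = some (cvB p) := by
  by_cases hm : p ∈ pyU ++ pyV
  · rcases cv_eq_mem p hm with h' | h'
    · exact absurd h' h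
    · exact h'
  · have hU : p ∉ pyU := fun hp => hm (List.mem_append.mpr (Or.inl hp))
    have hV : p ∉ pyV := fun hp => hm (List.mem_append.mpr (Or.inr hp))
    have hk : p ∉ toggle.keys := by
      rw [toggle_keys]
      intro hp
      rcases List.mem_append.mp hp with hp | hp
      · exact hU hp
      · exact hV (List.take_subset _ _ hp)
    have hc : toggle.contains p = false := by
      rw [PySem.Dict.contains_eq_decide_mem_keys]
      simp [hk]
    have hgd : toggle.getD p p = p := PySem.Dict.getD_of_not_contains toggle p hc
    simp [change_voicing?, hU, hV, cvB, hgd]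

lemma contains_of_mem_takeWhile {S : List String} {l : List String} {p : String}
    (h : p ∈ l.takeWhile (fun q => S.contains q)) : S.contains p = true := by
  have := List.mem_takeWhile_imp h
  simpa using this

-- the loop leaves a list alone when its last element is outside S
lemma loopA_stop (S : List String) (front : List String)
    (h : ∀ x ∈ front.getLast?, S.contains x = false) :
    devoiceLoopA S front front.length = front := by
  induction front using List.reverseRecOn with
  | nil => rfl
  | append_singleton ys x _ =>
    have hx : S.contains x = false := h x (by simp)
    have hlen : (ys ++ [x]).length = ys.length + 1 := by simp
    rw [hlen]
    unfold devoiceLoopA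
    rw [PySem.List.pyGet?_append_length]
    have hx' : x ∉ S := by simpa using hx
    simp [hx']

-- frame rule: with fuel ≤ |xs| the loop never reads or writes the appended tail
lemma loopA_frame (S : List String) :
    ∀ (n : Nat) (xs ys : List String), n ≤ xs.length →
    devoiceLoopA S (xs ++ ys) n = devoiceLoopA S xs n ++ ys := by
  intro n
  induction n with
  | zero => intro xs ys _; rfl
  | succ m ih =>
    intro xs ys hle
    have hm : m < xs.length := Nat.lt_of_lt_of_le (Nat.lt_succ_self m) hle
    unfold devoiceLoopA
    rw [PySem.List.pyGet?_natCast, PySem.List.pyGet?_natCast,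
        List.getElem?_append_left hm, List.getElem?_eq_getElem hm]
    cases hc : S.contains xs[m] with
    | false =>
      have h' : xs[m] ∉ S := by simpa using hc
      simp [h']
    | true =>
      cases hcv : change_voicing? xs[m] with
      | none => simp [hcv]
      | some q =>
        simp only [hcv]
        rw [PySem.List.pySetD_natCast, PySem.List.pySetD_natCast,
            List.set_append_left _ _ hm,
            ih (xs.set m q) ys (by simpa using Nat.le_of_lt hm)]
        have h' : xs[m] ∈ S := by simpa using hc
        simp [h']

-- processing a run: the loop toggles exactly the run, right to left
lemma loopA_run (S : List String) (run : List String) :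
    ∀ front : List String,
    (∀ p ∈ run, S.contains p = true ∧ p ≠ "dZ:") →
    (∀ x ∈ front.getLast?, S.contains x = false) →
    devoiceLoopA S (front ++ run) (front ++ run).length = front ++ run.map cvB := by
  induction run using List.reverseRecOn with
  | nil =>
    intro front _ hfront
    simpa using loopA_stop S front hfront
  | append_singleton rs p ih =>
    intro front hrun hfront
    have hp : S.contains p = true ∧ p ≠ "dZ:" := hrun p (by simp)
    have hlen : (front ++ (rs ++ [p])).length = (front ++ rs).length + 1 := by
      simp; omega
    rw [hlen]
    unfold devoiceLoopA
    rw [← List.append_assoc, PySem.List.pyGet?_append_length]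
    simp only [hp.1, if_true]
    rw [cv_eq p hp.2]
    show devoiceLoopA S
        (PySem.List.pySetD (front ++ rs ++ [p]) (((front ++ rs).length : Nat) : Int) (cvB p))
        (front ++ rs).length = front ++ List.map cvB (rs ++ [p])
    rw [PySem.List.pySetD_natCast]
    have hset : ((front ++ rs) ++ [p]).set (front ++ rs).length (cvB p)
        = (front ++ rs) ++ [cvB p] := by
      rw [List.set_append_right _ _ (Nat.le_refl _)]
      simp
    rw [hset, loopA_frame S _ (front ++ rs) [cvB p] (by simp)]
    have := ih front (fun q hq => hrun q (by simp [hq])) hfront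
    calc devoiceLoopA S (front ++ rs) (front ++ rs).length ++ [cvB p]
        = (front ++ rs.map cvB) ++ [cvB p] := by rw [this]
      _ = front ++ (rs ++ [p]).map cvB := by simp

-- the last element of the non-run prefix (if any) is outside S
lemma dropWhile_reverse_getLast (f : String → Bool) (l : List String) :
    ∀ x ∈ (l.dropWhile f).reverse.getLast?, f x = false := by
  intro x hx
  rw [List.getLast?_reverse] at hx
  have : (l.dropWhile f).head? = some x := hx
  cases hdl : l.dropWhile f with
  | nil => rw [hdl] at this; simp at this
  | cons y ys =>
    rw [hdl] at this
    simp at this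
    subst this
    have := List.head?_dropWhile_not f l
    rw [hdl] at this
    simpa using this

-- the forward pass computes (reversed dropWhile, reversed takeWhile) of the reversed list
lemma foldl_stepB (t : PySem.Dict String String) (xs : List String) :
    xs.foldl (stepB t) ([], [])
      = ((xs.reverse.dropWhile (fun p => t.contains p)).reverse,
         (xs.reverse.takeWhile (fun p => t.contains p)).reverse) := by
  induction xs using List.reverseRecOn with
  | nil => rfl
  | append_singleton ys x ih =>
    rw [List.foldl_append, ih]
    simp only [List.foldl_cons, List.foldl_nil, List.reverse_append, List.reverse_cons,
      List.reverse_nil, List.nil_append, List.singleton_append]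
    rw [List.takeWhile_cons, List.dropWhile_cons]
    cases hc : t.contains x with
    | true => simp [stepB, hc]
    | false =>
      have hid : (List.dropWhile (fun p => t.contains p) ys.reverse).reverse
          ++ (List.takeWhile (fun p => t.contains p) ys.reverse).reverse = ys := by
        rw [← List.reverse_append, List.takeWhile_append_dropWhile, List.reverse_reverse]
      simp [stepB, hc, ← List.append_assoc, hid]

-- takeWhile/dropWhile are unchanged when the two predicates agree on the relevant prefix
lemma tw_dw_congr (f g : String → Bool) (hfg : ∀ p, f p = true → g p = true) :
    ∀ l : List String, (∀ p ∈ l.takeWhile g, f p = true) →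
    l.takeWhile f = l.takeWhile g ∧ l.dropWhile f = l.dropWhile g := by
  intro l
  induction l with
  | nil => intro _; exact ⟨rfl, rfl⟩
  | cons p rest ih =>
    intro h
    cases hg : g p with
    | false =>
      have hf : f p = false := by
        cases hfp : f p with
        | false => rfl
        | true => rw [hfg p hfp] at hg; cases hg
      simp [List.takeWhile_cons, List.dropWhile_cons, hg, hf]
    | true =>
      have hf : f p = true := h p (by simp [List.takeWhile_cons, hg])
      have hrest := ih (fun q hq => h q (by simp [List.takeWhile_cons, hg, hq]))
      simp [List.takeWhile_cons, List.dropWhile_cons, hg, hf, hrest.1, hrest.2]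

-- lookupAll succeeds and maps when every element is looked up successfully
lemma lookupAll_map (t : PySem.Dict String String) (g : String → String) :
    ∀ l : List String, (∀ p ∈ l, t.get? p = some (g p)) →
    lookupAll t l = some (l.map g) := by
  intro l
  induction l with
  | nil => intro _; rfl
  | cons p rest ih =>
    intro h
    unfold lookupAll
    rw [h p (by simp), ih (fun q hq => h q (by simp [hq]))]
    simp

-- per-table facts, checked by evaluation
lemma keysVU : tableVU.keys = pyV.take 14 := by decide
lemma keysUV : tableUV.keys = pyU := by decide
lemma getVU : ∀ p ∈ pyV.take 14, tableVU.get? p = some (cvB p) := by decide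
lemma getUV : ∀ p ∈ pyU, tableUV.get? p = some (cvB p) := by decide
lemma memV14 : ∀ p ∈ pyV, p = "dZ:" ∨ p ∈ pyV.take 14 := by decide

-- one branch of the equivalence; keysList is the key list of the table
lemma branch_eq (S keysList : List String) (t : PySem.Dict String String) (phones : List String)
    (hkeys : t.keys = keysList)
    (hsub : ∀ p ∈ keysList, p ∈ S)
    (hget : ∀ p ∈ keysList, t.get? p = some (cvB p))
    (hrunkeys : ∀ p ∈ phones.reverse.takeWhile (fun p => S.contains p), p ∈ keysList)
    (hdZ : ∀ p ∈ phones.reverse.takeWhile (fun p => S.contains p), p ≠ "dZ:") :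
    devoiceLoopA S phones phones.length = applyB phones t := by
  have hkc : ∀ p : String, t.contains p = true → S.contains p = true := by
    intro p hp
    rw [PySem.Dict.contains_eq_decide_mem_keys, hkeys] at hp
    have : p ∈ keysList := by simpa using hp
    simpa using hsub p this
  have hck : ∀ p : String, p ∈ keysList → t.contains p = true := by
    intro p hp
    rw [PySem.Dict.contains_eq_decide_mem_keys, hkeys]
    simpa using hp
  set rev := phones.reverse with hrev
  have hcong := tw_dw_congr (fun p => t.contains p) (fun p => S.contains p) hkc rev
      (fun p hp => hck p (hrunkeys p hp))
  set tS := rev.takeWhile (fun p => S.contains p) with htS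
  set dS := rev.dropWhile (fun p => S.contains p) with hdS
  have hsplit : phones = dS.reverse ++ tS.reverse := by
    conv_lhs => rw [← List.reverse_reverse phones,
      ← List.takeWhile_append_dropWhile (p := fun p => S.contains p) (l := phones.reverse)]
    rw [List.reverse_append]
  -- A side
  have hrun : ∀ p ∈ tS.reverse, S.contains p = true ∧ p ≠ "dZ:" := by
    intro p hp
    rw [List.mem_reverse] at hp
    exact ⟨contains_of_mem_takeWhile hp, hdZ p hp⟩
  have hfront : ∀ x ∈ dS.reverse.getLast?, S.contains x = false :=
    dropWhile_reverse_getLast _ _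
  have hA : devoiceLoopA S phones phones.length = dS.reverse ++ tS.reverse.map cvB := by
    conv_lhs => rw [hsplit]
    exact loopA_run S tS.reverse dS.reverse hrun hfront
  -- B side
  have hB : applyB phones t = dS.reverse ++ tS.reverse.map cvB := by
    unfold applyB
    rw [foldl_stepB, ← hrev, hcong.1, hcong.2]
    have hlk : lookupAll t tS.reverse = some (tS.reverse.map cvB) := by
      refine lookupAll_map t cvB tS.reverse ?_
      intro p hp
      rw [List.mem_reverse] at hp
      exact hget p (hrunkeys p hp)
    simp [hlk]
  rw [hA, hB]

lemma main_eq (phones : List String) (hpre : Pre_devoice_final phones) :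
    devoice_final phones = devoice_final_alt phones := by
  obtain ⟨hne, hdZ⟩ := hpre
  unfold devoice_final devoice_final_alt
  cases hlast : PySem.List.pyGet? phones (-1) with
  | none => rfl
  | some last =>
    by_cases hV : pyV.contains last = true
    · simp only [hV, if_true]
      refine branch_eq pyV (pyV.take 14) tableVU phones keysVU
        (fun p hp => List.take_subset _ _ hp) getVU ?_ ?_
      · intro p hp
        have hmem : p ∈ pyV := by simpa using contains_of_mem_takeWhile hp
        rcases memV14 p hmem with h | h
        · exact absurd hp (h ▸ hdZ)
        · exact h
      · intro p hp hp'
        exact hdZ (hp' ▸ hp)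
    · by_cases hU : pyU.contains last = true
      · simp only [hV, hU, if_true]
        refine branch_eq pyU pyU tableUV phones keysUV (fun p hp => hp) getUV
          (fun p hp => by simpa using contains_of_mem_takeWhile hp) ?_
        intro p hp hp'
        subst hp'
        have : pyU.contains "dZ:" = true := contains_of_mem_takeWhile hp
        simp [pyU] at this
      · have hV' : last ∉ pyV := by simpa using hV
        have hU' : last ∉ pyU := by simpa using hU
        simp [hV', hU']

-- ===== VERDICT (by name: the statement is the Claim_ definition above) =====
theorem devoice_final_spec : Claim_equal_devoice_final := by
  intro phones _ hpre
  unfold Spec_devoice_final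
  exact main_eq phones hpre
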